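-- pv_equiv track=rewrite | github.com/hxrz11/wtf-pepe | poker_vision/src/core/symbol_splitter.py | _merge_box_group
-- ===== SOURCE A (Python) =====
-- from typing import List, Tuple, Optional
--
-- def _merge_box_group(boxes: List[Tuple[int, int, int, int]]) -> Tuple[int, int, int, int]:
--     """Merge a group of boxes into one bounding box.
--
--     Args:
--         boxes: List of boxes to merge
--
--     Returns:
--         Merged bounding box
--     """
--     if not boxes:
--         return (0, 0, 0, 0)
--
--     min_x = min(b[0] for b in boxes)
--     min_y = min(b[1] for b in boxes)
--     max_x = max(b[0] + b[2] for b in boxes)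
--     max_y = max(b[1] + b[3] for b in boxes)
--
--     return (min_x, min_y, max_x - min_x, max_y - min_y)
-- ===== SOURCE B (Python) =====
-- def _union_all(boxes):
--     # boxes is nonempty; divide and conquer: union of the two halves' bounding boxes
--     if len(boxes) == 1:
--         return boxes[0]
--     mid = len(boxes) // 2
--     ax, ay, aw, ah = _union_all(boxes[:mid])
--     bx, by, bw, bh = _union_all(boxes[mid:])
--     x = min(ax, bx)
--     y = min(ay, by)
--     r = max(ax + aw, bx + bw)
--     t = max(ay + ah, by + bh)
--     return (x, y, r - x, t - y)
--
--
-- def _merge_box_group(boxes):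
--     if not boxes:
--         return (0, 0, 0, 0)
--     return _union_all(boxes)
-- ===== Notes on version B (the rewrite author's own statement) =====
-- stated objective: alternative
-- what changed: Replaced A's four linear min/max generator scans with a divide-and-conquer recursion that splits the list in halves and merges the two halves' bounding boxes with a binary box-union operation.
import Mathlib
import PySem

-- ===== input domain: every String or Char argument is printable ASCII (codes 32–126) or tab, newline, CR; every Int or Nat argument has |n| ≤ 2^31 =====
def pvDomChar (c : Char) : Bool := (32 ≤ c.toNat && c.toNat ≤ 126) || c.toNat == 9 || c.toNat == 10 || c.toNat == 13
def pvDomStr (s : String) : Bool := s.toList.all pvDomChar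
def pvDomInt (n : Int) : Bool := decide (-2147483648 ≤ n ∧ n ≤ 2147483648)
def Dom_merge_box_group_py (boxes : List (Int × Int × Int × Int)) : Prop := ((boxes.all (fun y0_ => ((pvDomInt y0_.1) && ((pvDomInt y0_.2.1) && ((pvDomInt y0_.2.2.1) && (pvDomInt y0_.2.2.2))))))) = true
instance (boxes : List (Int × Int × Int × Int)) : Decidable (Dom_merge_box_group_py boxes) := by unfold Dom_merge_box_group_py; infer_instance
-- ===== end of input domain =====

-- ===== PORT A =====
-- B replaces A's four linear min/max scans with a divide-and-conquer recursion merging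
-- the two halves' bounding boxes; same return value, no mutation.
def merge_box_group_py (boxes : List (Int × Int × Int × Int)) : Int × Int × Int × Int :=
  if boxes = [] then (0, 0, 0, 0)
  else
    match PySem.List.min? (boxes.map (fun b => b.1)) (fun v => v),
          PySem.List.min? (boxes.map (fun b => b.2.1)) (fun v => v),
          PySem.List.max? (boxes.map (fun b => b.1 + b.2.2.1)) (fun v => v),
          PySem.List.max? (boxes.map (fun b => b.2.1 + b.2.2.2)) (fun v => v) with
    | some mnx, some mny, some mxx, some mxy => (mnx, mny, mxx - mnx, mxy - mny)
    | _, _, _, _ => (0, 0, 0, 0)  -- unreachable: the list is nonempty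

-- ===== PORT B =====
-- divide and conquer: union of the two halves' bounding boxes (Python's _union_all;
-- the [] branch is a totality guard — Python never calls it on []).
def unionAll (boxes : List (Int × Int × Int × Int)) : Int × Int × Int × Int :=
  match boxes with
  | [] => (0, 0, 0, 0)
  | [b] => b
  | p :: q :: rest =>
    let A := unionAll ((p :: q :: rest).take ((p :: q :: rest).length / 2))
    let B := unionAll ((p :: q :: rest).drop ((p :: q :: rest).length / 2))
    (min A.1 B.1, min A.2.1 B.2.1,
     max (A.1 + A.2.2.1) (B.1 + B.2.2.1) - min A.1 B.1,
     max (A.2.1 + A.2.2.2) (B.2.1 + B.2.2.2) - min A.2.1 B.2.1)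
termination_by boxes.length
decreasing_by
  · simp [List.length_take]; omega
  · simp; omega

def merge_box_group_py_alt (boxes : List (Int × Int × Int × Int)) : Int × Int × Int × Int :=
  if boxes = [] then (0, 0, 0, 0) else unionAll boxes

-- ===== PRECONDITION & SPEC =====
def Spec_merge_box_group_py (boxes : List (Int × Int × Int × Int)) (out : Int × Int × Int × Int) : Prop := out = merge_box_group_py_alt boxes
instance (boxes : List (Int × Int × Int × Int)) (out : Int × Int × Int × Int) : Decidable (Spec_merge_box_group_py boxes out) := by unfold Spec_merge_box_group_py; infer_instance

-- ===== CLAIM (what is proved, stated in full; the proofs are below) =====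
def Claim_equal_merge_box_group_py : Prop := ∀ (boxes : List (Int × Int × Int × Int)), Dom_merge_box_group_py boxes → Spec_merge_box_group_py boxes (merge_box_group_py boxes)

-- ===== LEMMAS AND PROOFS =====

-- running min/max of (f b) over a list, with a seed
def fmin (f : (Int × Int × Int × Int) → Int) (s : Int) (l : List (Int × Int × Int × Int)) : Int :=
  l.foldl (fun s b => min s (f b)) s
def fmax (f : (Int × Int × Int × Int) → Int) (s : Int) (l : List (Int × Int × Int × Int)) : Int :=
  l.foldl (fun s b => max s (f b)) s

-- min/max of (f b) over a nonempty list ([] gets a junk value)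
def lo (f : (Int × Int × Int × Int) → Int) : List (Int × Int × Int × Int) → Int
  | [] => 0
  | b :: t => fmin f (f b) t
def hi (f : (Int × Int × Int × Int) → Int) : List (Int × Int × Int × Int) → Int
  | [] => 0
  | b :: t => fmax f (f b) t

theorem fmin_glue (f : (Int × Int × Int × Int) → Int) (a b : Int)
    (l : List (Int × Int × Int × Int)) : min a (fmin f b l) = fmin f (min a b) l := by
  induction l generalizing b with
  | nil => rfl
  | cons c t ih => simp only [fmin, List.foldl_cons] at *; rw [ih, min_assoc]

theorem fmax_glue (f : (Int × Int × Int × Int) → Int) (a b : Int)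
    (l : List (Int × Int × Int × Int)) : max a (fmax f b l) = fmax f (max a b) l := by
  induction l generalizing b with
  | nil => rfl
  | cons c t ih => simp only [fmax, List.foldl_cons] at *; rw [ih, max_assoc]

theorem lo_append (f : (Int × Int × Int × Int) → Int) (b c : Int × Int × Int × Int)
    (t u : List (Int × Int × Int × Int)) :
    lo f ((b :: t) ++ (c :: u)) = min (lo f (b :: t)) (lo f (c :: u)) := by
  simp only [lo, List.cons_append, fmin, List.foldl_append, List.foldl_cons]
  exact (fmin_glue f _ (f c) u).symm

theorem hi_append (f : (Int × Int × Int × Int) → Int) (b c : Int × Int × Int × Int)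
    (t u : List (Int × Int × Int × Int)) :
    hi f ((b :: t) ++ (c :: u)) = max (hi f (b :: t)) (hi f (c :: u)) := by
  simp only [hi, List.cons_append, fmax, List.foldl_append, List.foldl_cons]
  exact (fmax_glue f _ (f c) u).symm

theorem unionAll_char (boxes : List (Int × Int × Int × Int)) (h : boxes ≠ []) :
    unionAll boxes =
      (lo (fun b => b.1) boxes, lo (fun b => b.2.1) boxes,
       hi (fun b => b.1 + b.2.2.1) boxes - lo (fun b => b.1) boxes,
       hi (fun b => b.2.1 + b.2.2.2) boxes - lo (fun b => b.2.1) boxes) := by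
  fun_induction unionAll boxes with
  | case1 => exact absurd rfl h
  | case2 b =>
    obtain ⟨x, y, w, hh⟩ := b
    simp [lo, hi, fmin, fmax]
  | case3 p q rest A B iht ihd =>
    have hlen : (p :: q :: rest).length = rest.length + 2 := by simp
    have htne : (p :: q :: rest).take ((p :: q :: rest).length / 2) ≠ [] := by
      rw [Ne, List.take_eq_nil_iff]
      simp
    have hdne : (p :: q :: rest).drop ((p :: q :: rest).length / 2) ≠ [] := by
      rw [Ne, List.drop_eq_nil_iff]
      omega
    simp only [A, B]
    rw [iht htne, ihd hdne]
    obtain ⟨b1, t1, ht⟩ : ∃ b1 t1,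
        (p :: q :: rest).take ((p :: q :: rest).length / 2) = b1 :: t1 := by
      cases hc : (p :: q :: rest).take ((p :: q :: rest).length / 2) with
      | nil => exact absurd hc htne
      | cons a b => exact ⟨a, b, rfl⟩
    obtain ⟨b2, t2, hd⟩ : ∃ b2 t2,
        (p :: q :: rest).drop ((p :: q :: rest).length / 2) = b2 :: t2 := by
      cases hc : (p :: q :: rest).drop ((p :: q :: rest).length / 2) with
      | nil => exact absurd hc hdne
      | cons a b => exact ⟨a, b, rfl⟩
    have hsplit : p :: q :: rest = (b1 :: t1) ++ (b2 :: t2) := by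
      rw [← ht, ← hd, List.take_append_drop]
    conv_rhs => rw [hsplit]
    simp only [lo_append, hi_append, ht, hd, Prod.mk.injEq]
    simp only [show ∀ a b : ℤ, a + (b - a) = b from fun a b => by omega]
    exact ⟨trivial, trivial, trivial, trivial⟩

-- A's port on a nonempty list, in the same lo/hi terms
theorem portA_char (b : Int × Int × Int × Int) (t : List (Int × Int × Int × Int)) :
    merge_box_group_py (b :: t) =
      (lo (fun b => b.1) (b :: t), lo (fun b => b.2.1) (b :: t),
       hi (fun b => b.1 + b.2.2.1) (b :: t) - lo (fun b => b.1) (b :: t),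
       hi (fun b => b.2.1 + b.2.2.2) (b :: t) - lo (fun b => b.2.1) (b :: t)) := by
  simp only [merge_box_group_py, List.map_cons, PySem.List.min?_id_cons,
    PySem.List.max?_id_cons, List.foldl_map, reduceCtorEq, if_false, lo, hi, fmin, fmax]

-- ===== VERDICT (by name: the statement is the Claim_ definition above) =====
theorem merge_box_group_py_spec : Claim_equal_merge_box_group_py := by
  intro boxes _
  unfold Spec_merge_box_group_py merge_box_group_py_alt
  match boxes with
  | [] => rfl
  | b :: t =>
    rw [portA_char, unionAll_char (b :: t) (by simp), if_neg (by simp)]
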